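-- pv_equiv track=rewrite | github.com/truongphillipthanh/syncrescendence | 06-ORCHESTRATION/scripts/rename_transcripts.py | transform_to_new_standard
-- ===== SOURCE A (Python) =====
-- def transform_to_new_standard(date, rest, ext):
--     """Transform to Principal's standard using underscores for platform_format."""
--     # Replace platform-format (hyphen) with platform_format (underscore)
--     transformations = [
--         ('youtube-interview', 'youtube_video'),
--         ('youtube-lecture', 'youtube_lecture'),
--         ('youtube-tutorial', 'youtube_tutorial'),
--         ('youtube-panel', 'youtube_panel'),
--         ('youtube-solo', 'youtube_solo'),
--         ('x-thread', 'x_thread'),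
--         ('podcast-interview', 'podcast_interview'),
--         ('podcast-solo', 'podcast_solo'),
--         ('substack-article', 'substack_article'),
--         ('arxiv-paper', 'arxiv_paper'),
--     ]
--
--     for old, new in transformations:
--         rest = rest.replace(old, new)
--
--     # Construct new name
--     new_name = f"{date}-{rest}.{ext}"
--
--     return new_name
-- ===== SOURCE B (Python) =====
-- def transform_to_new_standard(date, rest, ext):
--     """Transform to Principal's standard: single left-to-right pass over `rest`
--     driven by a token table, instead of ten sequential whole-string replaces."""
--     table = {
--         'youtube-interview': 'youtube_video',
--         'youtube-lecture': 'youtube_lecture',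
--         'youtube-tutorial': 'youtube_tutorial',
--         'youtube-panel': 'youtube_panel',
--         'youtube-solo': 'youtube_solo',
--         'x-thread': 'x_thread',
--         'podcast-interview': 'podcast_interview',
--         'podcast-solo': 'podcast_solo',
--         'substack-article': 'substack_article',
--         'arxiv-paper': 'arxiv_paper',
--     }
--     out = []
--     i = 0
--     n = len(rest)
--     while i < n:
--         for old, new in table.items():
--             if rest.startswith(old, i):
--                 out.append(new)
--                 i += len(old)
--                 break
--         else:
--             out.append(rest[i])
--             i += 1
--     return f"{date}-{''.join(out)}.{ext}"
-- ===== Notes on version B (the rewrite author's own statement) =====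
-- stated objective: alternative
-- what changed: Replaces ten sequential whole-string str.replace passes by one table-driven left-to-right pass that looks up each position in a token dict (safe because no replacement value contains or overlaps any key and keys cannot overlap each other).
import Mathlib
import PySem

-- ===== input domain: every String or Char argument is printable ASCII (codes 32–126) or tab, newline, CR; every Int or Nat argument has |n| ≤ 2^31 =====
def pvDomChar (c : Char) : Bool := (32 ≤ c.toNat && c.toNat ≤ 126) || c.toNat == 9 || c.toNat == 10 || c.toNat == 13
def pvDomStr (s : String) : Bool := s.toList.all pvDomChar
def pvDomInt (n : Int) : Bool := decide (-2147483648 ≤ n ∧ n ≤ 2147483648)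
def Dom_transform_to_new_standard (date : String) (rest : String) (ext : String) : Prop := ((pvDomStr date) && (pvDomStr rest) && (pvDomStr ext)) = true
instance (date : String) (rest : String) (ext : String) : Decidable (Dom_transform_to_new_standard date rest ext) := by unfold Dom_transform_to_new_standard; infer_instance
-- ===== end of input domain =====

-- B replaces A's ten sequential whole-string replace passes by one table-driven
-- left-to-right pass over `rest` (objective: alternative, same result).

-- ===== PORT A =====
def pvTableA : List (String × String) := [
  ("youtube-interview", "youtube_video"),
  ("youtube-lecture", "youtube_lecture"),
  ("youtube-tutorial", "youtube_tutorial"),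
  ("youtube-panel", "youtube_panel"),
  ("youtube-solo", "youtube_solo"),
  ("x-thread", "x_thread"),
  ("podcast-interview", "podcast_interview"),
  ("podcast-solo", "podcast_solo"),
  ("substack-article", "substack_article"),
  ("arxiv-paper", "arxiv_paper")]

def transform_to_new_standard (date : String) (rest : String) (ext : String) : String :=
  let rest' := pvTableA.foldl (fun r p => PySem.Str.replace r p.1 p.2) rest
  date ++ "-" ++ rest' ++ "." ++ ext

-- ===== PORT B =====
-- Source B's dict, as an association list of key/replacement token pairs (char lists).
def pvTableB : List (List Char × List Char) := [
  ("youtube-interview".toList, "youtube_video".toList),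
  ("youtube-lecture".toList, "youtube_lecture".toList),
  ("youtube-tutorial".toList, "youtube_tutorial".toList),
  ("youtube-panel".toList, "youtube_panel".toList),
  ("youtube-solo".toList, "youtube_solo".toList),
  ("x-thread".toList, "x_thread".toList),
  ("podcast-interview".toList, "podcast_interview".toList),
  ("podcast-solo".toList, "podcast_solo".toList),
  ("substack-article".toList, "substack_article".toList),
  ("arxiv-paper".toList, "arxiv_paper".toList)]

-- Source B's while-loop over `rest`: at each position try the table keys in order
-- (the for/break is List.find?); on a hit emit the replacement and skip the key,
-- otherwise emit the character and move on.
def pvScan : List Char → List Char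
  | [] => []
  | c :: t =>
    (pvTableB.find? (fun p => p.1.isPrefixOf (c :: t))).elim
      (c :: pvScan t)
      (fun p => p.2 ++ pvScan (t.drop (p.1.length - 1)))
termination_by l => l.length
decreasing_by
  all_goals simp only [List.length_drop, List.length_cons]
  all_goals omega

def transform_to_new_standard_alt (date : String) (rest : String) (ext : String) : String :=
  date ++ "-" ++ String.ofList (pvScan rest.toList) ++ "." ++ ext

-- ===== PRECONDITION & SPEC =====
def Spec_transform_to_new_standard (date : String) (rest : String) (ext : String) (out : String) : Prop := out = transform_to_new_standard_alt date rest ext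
instance (date : String) (rest : String) (ext : String) (out : String) : Decidable (Spec_transform_to_new_standard date rest ext out) := by unfold Spec_transform_to_new_standard; infer_instance

-- ===== CLAIM (what is proved, stated in full; the proofs are below) =====
def Claim_equal_transform_to_new_standard : Prop := ∀ (date : String) (rest : String) (ext : String), Dom_transform_to_new_standard date rest ext → Spec_transform_to_new_standard date rest ext (transform_to_new_standard date rest ext)

-- ===== LEMMAS AND PROOFS =====

-- Structural model of Python's s.replace(k, v): leftmost, non-overlapping scan.
def pvRepl (k v : List Char) : List Char → List Char
  | [] => []
  | c :: t =>
    if k.isPrefixOf (c :: t) then v ++ pvRepl k v (t.drop (k.length - 1))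
    else c :: pvRepl k v t
termination_by l => l.length
decreasing_by
  all_goals simp only [List.length_drop, List.length_cons]
  all_goals omega

def pvFoldRepl (tbl : List (List Char × List Char)) (s : List Char) : List Char :=
  tbl.foldl (fun l p => pvRepl p.1 p.2 l) s

-- No occurrence of k can cross the right edge of x:
-- no nonempty suffix of x shorter than k is a prefix of k.
def pvBcond (k x : List Char) : Bool :=
  x.tails.all (fun u => u.isEmpty || !(u.isPrefixOf k && decide (u.length < k.length)))

-- No suffix of u interacts with v in either direction.
def pvGood (v u : List Char) : Bool :=
  u.tails.all (fun w => w.isEmpty || (!w.isPrefixOf v && !v.isPrefixOf w))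

theorem pvRepl_nil (k v : List Char) : pvRepl k v [] = [] := by simp [pvRepl]

theorem pvRepl_cons_pos (k v : List Char) (c : Char) (t : List Char)
    (h : k.isPrefixOf (c :: t) = true) :
    pvRepl k v (c :: t) = v ++ pvRepl k v (t.drop (k.length - 1)) := by
  rw [pvRepl]; simp [h]

theorem pvRepl_cons_neg (k v : List Char) (c : Char) (t : List Char)
    (h : k.isPrefixOf (c :: t) = false) :
    pvRepl k v (c :: t) = c :: pvRepl k v t := by
  rw [pvRepl]; simp [h]

theorem pvNotPrefix_isPrefixOf_false (k l : List Char) (h : ¬ k <+: l) :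
    k.isPrefixOf l = false := by
  rw [Bool.eq_false_iff]; intro hco; exact h (List.isPrefixOf_iff_prefix.mp hco)

theorem pvRepl_prepend (k v y : List Char) (hk : k ≠ []) :
    pvRepl k v (k ++ y) = v ++ pvRepl k v y := by
  cases k with
  | nil => exact absurd rfl hk
  | cons a k' =>
    have hp : (a :: k').isPrefixOf (a :: (k' ++ y)) = true := by
      rw [List.isPrefixOf_iff_prefix]
      exact ⟨y, by simp⟩
    have h := pvRepl_cons_pos (a :: k') v a (k' ++ y) hp
    simpa [List.drop_left' (rfl : k'.length = k'.length)] using h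

theorem pvBcond_suffix (k x x' : List Char) (h : pvBcond k x = true) (hs : x' <:+ x) :
    pvBcond k x' = true := by
  simp only [pvBcond, List.all_eq_true] at h ⊢
  intro u hu
  exact h u (by rw [List.mem_tails] at hu ⊢; exact hu.trans hs)

theorem pvGood_suffix (v u u' : List Char) (h : pvGood v u = true) (hs : u' <:+ u) :
    pvGood v u' = true := by
  simp only [pvGood, List.all_eq_true] at h ⊢
  intro w hw
  exact h w (by rw [List.mem_tails] at hw ⊢; exact hw.trans hs)

-- If no occurrence of k can cross the right edge of x and k does not occur in x,
-- then replace skips x unchanged.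
theorem pvTransp (k v x y : List Char) (hb : pvBcond k x = true) (hni : ¬ k <:+: x) :
    pvRepl k v (x ++ y) = x ++ pvRepl k v y := by
  induction x with
  | nil => simp
  | cons c x' ih =>
    have hp : k.isPrefixOf (c :: (x' ++ y)) = false := by
      apply pvNotPrefix_isPrefixOf_false
      intro hk
      have hx : (c :: x') <+: (c :: x') ++ y := ⟨y, rfl⟩
      rcases List.prefix_or_prefix_of_prefix (by simpa using hk) hx with h1 | h2
      · exact hni h1.isInfix
      · rcases eq_or_ne (c :: x') k with he | hne
        · exact hni (he ▸ List.infix_refl _)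
        · have hlt : (c :: x').length < k.length := by
            rcases lt_or_eq_of_le h2.length_le with h | h
            · exact h
            · exact absurd (List.IsPrefix.eq_of_length h2 h) hne
          have hball := (by simpa only [pvBcond, List.all_eq_true] using hb :
            ∀ u ∈ (c :: x').tails,
              (u.isEmpty || !(u.isPrefixOf k && decide (u.length < k.length))) = true)
          have hcx := hball (c :: x') (by rw [List.mem_tails])
          have hand : ((c :: x').isPrefixOf k && decide ((c :: x').length < k.length)) = true := by
            rw [Bool.and_eq_true]
            exact ⟨List.isPrefixOf_iff_prefix.mpr h2, by simpa using hlt⟩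
          have hnot : (!((c :: x').isPrefixOf k && decide ((c :: x').length < k.length))) = true := hcx
          rw [hand] at hnot
          simp at hnot
    rw [show (c :: x') ++ y = c :: (x' ++ y) from rfl, pvRepl_cons_neg _ _ _ _ hp,
      ih (pvBcond_suffix k _ x' hb (List.suffix_cons c x'))
        (fun h => hni (h.trans (List.suffix_cons c x').isInfix))]
    rfl

theorem pvFoldRepl_cons (p : List Char × List Char) (tl : List (List Char × List Char))
    (s : List Char) : pvFoldRepl (p :: tl) s = pvFoldRepl tl (pvRepl p.1 p.2 s) := rfl

theorem pvFoldRepl_append (t1 t2 : List (List Char × List Char)) (s : List Char) :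
    pvFoldRepl (t1 ++ t2) s = pvFoldRepl t2 (pvFoldRepl t1 s) := by
  simp [pvFoldRepl, List.foldl_append]

theorem pvFoldRepl_empty (tbl : List (List Char × List Char)) : pvFoldRepl tbl [] = [] := by
  induction tbl with
  | nil => rfl
  | cons p tl ih => rw [pvFoldRepl_cons, pvRepl_nil]; exact ih

theorem pvFold_split (tbl : List (List Char × List Char)) (x : List Char) :
    (∀ p ∈ tbl, pvBcond p.1 x = true ∧ ¬ p.1 <:+: x) → ∀ y : List Char,
    pvFoldRepl tbl (x ++ y) = x ++ pvFoldRepl tbl y := by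
  induction tbl with
  | nil => intro _ y; rfl
  | cons p tl ih =>
    intro h y
    rw [pvFoldRepl_cons, pvFoldRepl_cons,
      pvTransp p.1 p.2 x y (h p (List.mem_cons_self)).1 (h p (List.mem_cons_self)).2,
      ih (fun q hq => h q (List.mem_cons_of_mem _ hq)) (pvRepl p.1 p.2 y)]

theorem pvMid (pre post : List (List Char × List Char)) (k v : List Char) (hk : k ≠ [])
    (h1 : ∀ p ∈ pre, pvBcond p.1 k = true ∧ ¬ p.1 <:+: k)
    (h2 : ∀ p ∈ post, pvBcond p.1 v = true ∧ ¬ p.1 <:+: v)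
    (y : List Char) :
    pvFoldRepl (pre ++ (k, v) :: post) (k ++ y) = v ++ pvFoldRepl (pre ++ (k, v) :: post) y := by
  rw [pvFoldRepl_append, pvFoldRepl_append, pvFold_split pre k h1 y, pvFoldRepl_cons,
    pvFoldRepl_cons, pvRepl_prepend k v _ hk, pvFold_split post v h2 _]

-- If no suffix of u interacts with v, a prefix of the replaced string is a prefix
-- of the original.
theorem pvGoodpre (k v : List Char) : ∀ (n : Nat) (t u : List Char), t.length ≤ n →
    pvGood v u = true → u <+: pvRepl k v t → u <+: t := by
  intro n
  induction n with
  | zero =>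
    intro t u ht hg hp
    have : t = [] := List.length_eq_zero_iff.mp (Nat.le_zero.mp ht)
    subst this
    rw [pvRepl_nil] at hp
    rw [List.prefix_nil.mp hp]
  | succ n ih =>
    intro t u ht hg hp
    cases t with
    | nil =>
      rw [pvRepl_nil] at hp
      rw [List.prefix_nil.mp hp]
    | cons c t' =>
      by_cases hpre : k.isPrefixOf (c :: t') = true
      · rw [pvRepl_cons_pos _ _ _ _ hpre] at hp
        cases u with
        | nil => exact List.nil_prefix
        | cons d u' =>
          have hgu := (by simpa only [pvGood, List.all_eq_true] using hg :
            ∀ w ∈ (d :: u').tails,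
              (w.isEmpty || (!w.isPrefixOf v && !v.isPrefixOf w)) = true)
            (d :: u') (by rw [List.mem_tails])
          simp only [List.isEmpty_cons, Bool.false_or, Bool.and_eq_true,
            Bool.not_eq_true'] at hgu
          have hv : v <+: v ++ pvRepl k v (t'.drop (k.length - 1)) := ⟨_, rfl⟩
          rcases List.prefix_or_prefix_of_prefix hp hv with h1 | h2
          · exact absurd (List.isPrefixOf_iff_prefix.mpr h1) (Bool.eq_false_iff.mp hgu.1)
          · exact absurd (List.isPrefixOf_iff_prefix.mpr h2) (Bool.eq_false_iff.mp hgu.2)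
      · rw [pvRepl_cons_neg _ _ _ _ (Bool.eq_false_iff.mpr hpre)] at hp
        cases u with
        | nil => exact List.nil_prefix
        | cons d u' =>
          rw [List.cons_prefix_cons] at hp
          obtain ⟨rfl, hp'⟩ := hp
          have hrec := ih t' u' (by simp at ht; omega)
            (pvGood_suffix v _ u' hg (List.suffix_cons d u')) hp'
          exact List.cons_prefix_cons.mpr ⟨rfl, hrec⟩

-- "No key matches at the head" is preserved by one replace pass on the tail.
theorem pvPkeep (k v ki : List Char) (c : Char) (t : List Char) (hki : ki ≠ [])
    (hg : pvGood v (ki.drop 1) = true) (hm : ¬ ki <+: (c :: t)) :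
    ¬ ki <+: (c :: pvRepl k v t) := by
  intro h
  cases ki with
  | nil => exact hki rfl
  | cons a u =>
    rw [List.cons_prefix_cons] at h
    obtain ⟨rfl, hu⟩ := h
    have := pvGoodpre k v t.length t u (le_refl _) (by simpa using hg) hu
    exact hm (List.cons_prefix_cons.mpr ⟨rfl, this⟩)

theorem pvFold_nomatch (tbl : List (List Char × List Char)) :
    (∀ p ∈ tbl, ∀ q ∈ tbl, pvGood q.2 (p.1.drop 1) = true) → ∀ (c : Char) (t : List Char),
    (∀ p ∈ tbl, ¬ p.1 <+: (c :: t)) →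
    pvFoldRepl tbl (c :: t) = c :: pvFoldRepl tbl t := by
  induction tbl with
  | nil => intro _ c t _; rfl
  | cons q tl ih =>
    intro hg c t hm
    have hq := hm q (List.mem_cons_self)
    have hqp : q.1.isPrefixOf (c :: t) = false := pvNotPrefix_isPrefixOf_false _ _ hq
    rw [pvFoldRepl_cons, pvRepl_cons_neg _ _ _ _ hqp,
      ih (fun p hp q' hq' => hg p (List.mem_cons_of_mem _ hp) q' (List.mem_cons_of_mem _ hq'))
        c (pvRepl q.1 q.2 t) ?_, pvFoldRepl_cons]
    intro p hp
    have hmp := hm p (List.mem_cons_of_mem _ hp)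
    by_cases hpe : p.1 = []
    · exact absurd (hpe ▸ List.nil_prefix) hmp
    · exact pvPkeep q.1 q.2 p.1 c t hpe
        (hg p (List.mem_cons_of_mem _ hp) q (List.mem_cons_self)) hmp

-- A matched key at the head: the whole ten-pass fold consumes it as one token.
theorem pvStep (k v : List Char) (hmem : (k, v) ∈ pvTableB) (c : Char) (t : List Char)
    (hpre : k <+: (c :: t)) :
    pvFoldRepl pvTableB (c :: t) = v ++ pvFoldRepl pvTableB (t.drop (k.length - 1)) := by
  have hk : k ≠ [] := by
    have hall : ∀ p ∈ pvTableB, p.1 ≠ ([] : List Char) := by decide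
    exact hall _ hmem
  obtain ⟨y, hy⟩ := hpre
  have ht : t.drop (k.length - 1) = y := by
    cases k with
    | nil => exact absurd rfl hk
    | cons a k' =>
      have : t = k' ++ y := by
        have := hy
        simp only [List.cons_append, List.cons.injEq] at this
        exact this.2.symm
      rw [this]
      simp [List.drop_left' (rfl : k'.length = k'.length)]
  rw [ht, show (c :: t) = k ++ y from hy.symm]
  simp only [pvTableB, List.mem_cons, Prod.mk.injEq,
    List.not_mem_nil, or_false] at hmem
  rcases hmem with ⟨rfl, rfl⟩ | ⟨rfl, rfl⟩ | ⟨rfl, rfl⟩ | ⟨rfl, rfl⟩ | ⟨rfl, rfl⟩ | ⟨rfl, rfl⟩ | ⟨rfl, rfl⟩ | ⟨rfl, rfl⟩ | ⟨rfl, rfl⟩ | ⟨rfl, rfl⟩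
  · exact pvMid []
      [("youtube-lecture".toList, "youtube_lecture".toList), ("youtube-tutorial".toList, "youtube_tutorial".toList), ("youtube-panel".toList, "youtube_panel".toList), ("youtube-solo".toList, "youtube_solo".toList), ("x-thread".toList, "x_thread".toList), ("podcast-interview".toList, "podcast_interview".toList), ("podcast-solo".toList, "podcast_solo".toList), ("substack-article".toList, "substack_article".toList), ("arxiv-paper".toList, "arxiv_paper".toList)] _ _ (by decide) (by decide) (by decide) y
  · exact pvMid [("youtube-interview".toList, "youtube_video".toList)]
      [("youtube-tutorial".toList, "youtube_tutorial".toList), ("youtube-panel".toList, "youtube_panel".toList), ("youtube-solo".toList, "youtube_solo".toList), ("x-thread".toList, "x_thread".toList), ("podcast-interview".toList, "podcast_interview".toList), ("podcast-solo".toList, "podcast_solo".toList), ("substack-article".toList, "substack_article".toList), ("arxiv-paper".toList, "arxiv_paper".toList)] _ _ (by decide) (by decide) (by decide) y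
  · exact pvMid [("youtube-interview".toList, "youtube_video".toList), ("youtube-lecture".toList, "youtube_lecture".toList)]
      [("youtube-panel".toList, "youtube_panel".toList), ("youtube-solo".toList, "youtube_solo".toList), ("x-thread".toList, "x_thread".toList), ("podcast-interview".toList, "podcast_interview".toList), ("podcast-solo".toList, "podcast_solo".toList), ("substack-article".toList, "substack_article".toList), ("arxiv-paper".toList, "arxiv_paper".toList)] _ _ (by decide) (by decide) (by decide) y
  · exact pvMid [("youtube-interview".toList, "youtube_video".toList), ("youtube-lecture".toList, "youtube_lecture".toList), ("youtube-tutorial".toList, "youtube_tutorial".toList)]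
      [("youtube-solo".toList, "youtube_solo".toList), ("x-thread".toList, "x_thread".toList), ("podcast-interview".toList, "podcast_interview".toList), ("podcast-solo".toList, "podcast_solo".toList), ("substack-article".toList, "substack_article".toList), ("arxiv-paper".toList, "arxiv_paper".toList)] _ _ (by decide) (by decide) (by decide) y
  · exact pvMid [("youtube-interview".toList, "youtube_video".toList), ("youtube-lecture".toList, "youtube_lecture".toList), ("youtube-tutorial".toList, "youtube_tutorial".toList), ("youtube-panel".toList, "youtube_panel".toList)]
      [("x-thread".toList, "x_thread".toList), ("podcast-interview".toList, "podcast_interview".toList), ("podcast-solo".toList, "podcast_solo".toList), ("substack-article".toList, "substack_article".toList), ("arxiv-paper".toList, "arxiv_paper".toList)] _ _ (by decide) (by decide) (by decide) y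
  · exact pvMid [("youtube-interview".toList, "youtube_video".toList), ("youtube-lecture".toList, "youtube_lecture".toList), ("youtube-tutorial".toList, "youtube_tutorial".toList), ("youtube-panel".toList, "youtube_panel".toList), ("youtube-solo".toList, "youtube_solo".toList)]
      [("podcast-interview".toList, "podcast_interview".toList), ("podcast-solo".toList, "podcast_solo".toList), ("substack-article".toList, "substack_article".toList), ("arxiv-paper".toList, "arxiv_paper".toList)] _ _ (by decide) (by decide) (by decide) y
  · exact pvMid [("youtube-interview".toList, "youtube_video".toList), ("youtube-lecture".toList, "youtube_lecture".toList), ("youtube-tutorial".toList, "youtube_tutorial".toList), ("youtube-panel".toList, "youtube_panel".toList), ("youtube-solo".toList, "youtube_solo".toList), ("x-thread".toList, "x_thread".toList)]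
      [("podcast-solo".toList, "podcast_solo".toList), ("substack-article".toList, "substack_article".toList), ("arxiv-paper".toList, "arxiv_paper".toList)] _ _ (by decide) (by decide) (by decide) y
  · exact pvMid [("youtube-interview".toList, "youtube_video".toList), ("youtube-lecture".toList, "youtube_lecture".toList), ("youtube-tutorial".toList, "youtube_tutorial".toList), ("youtube-panel".toList, "youtube_panel".toList), ("youtube-solo".toList, "youtube_solo".toList), ("x-thread".toList, "x_thread".toList), ("podcast-interview".toList, "podcast_interview".toList)]
      [("substack-article".toList, "substack_article".toList), ("arxiv-paper".toList, "arxiv_paper".toList)] _ _ (by decide) (by decide) (by decide) y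
  · exact pvMid [("youtube-interview".toList, "youtube_video".toList), ("youtube-lecture".toList, "youtube_lecture".toList), ("youtube-tutorial".toList, "youtube_tutorial".toList), ("youtube-panel".toList, "youtube_panel".toList), ("youtube-solo".toList, "youtube_solo".toList), ("x-thread".toList, "x_thread".toList), ("podcast-interview".toList, "podcast_interview".toList), ("podcast-solo".toList, "podcast_solo".toList)]
      [("arxiv-paper".toList, "arxiv_paper".toList)] _ _ (by decide) (by decide) (by decide) y
  · exact pvMid [("youtube-interview".toList, "youtube_video".toList), ("youtube-lecture".toList, "youtube_lecture".toList), ("youtube-tutorial".toList, "youtube_tutorial".toList), ("youtube-panel".toList, "youtube_panel".toList), ("youtube-solo".toList, "youtube_solo".toList), ("x-thread".toList, "x_thread".toList), ("podcast-interview".toList, "podcast_interview".toList), ("podcast-solo".toList, "podcast_solo".toList), ("substack-article".toList, "substack_article".toList)]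
      [] _ _ (by decide) (by decide) (by decide) y

theorem pvMain : ∀ (n : Nat) (l : List Char), l.length ≤ n →
    pvFoldRepl pvTableB l = pvScan l := by
  intro n
  induction n with
  | zero =>
    intro l h
    have : l = [] := List.length_eq_zero_iff.mp (Nat.le_zero.mp h)
    subst this
    rw [pvFoldRepl_empty]
    simp [pvScan]
  | succ n ih =>
    intro l hl
    cases l with
    | nil => rw [pvFoldRepl_empty]; simp [pvScan]
    | cons c t =>
      have hscan : pvScan (c :: t) =
          (pvTableB.find? (fun p => p.1.isPrefixOf (c :: t))).elim
            (c :: pvScan t)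
            (fun p => p.2 ++ pvScan (t.drop (p.1.length - 1))) := by
        rw [pvScan.eq_def]
      rcases hfind : pvTableB.find? (fun p => p.1.isPrefixOf (c :: t)) with _ | p
      · have hm : ∀ p ∈ pvTableB, ¬ p.1 <+: (c :: t) := by
          intro p hp hcon
          have := List.find?_eq_none.mp hfind p hp
          simp only [Bool.not_eq_true] at this
          exact absurd (List.isPrefixOf_iff_prefix.mpr hcon) (Bool.eq_false_iff.mp this)
        rw [pvFold_nomatch pvTableB (by decide) c t hm, hscan, hfind]
        simp only [Option.elim]
        exact congrArg _ (ih t (by simp at hl; omega))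
      · have hmem : p ∈ pvTableB := List.mem_of_find?_eq_some hfind
        have hps := List.find?_some hfind
        have hpre : p.1 <+: (c :: t) := List.isPrefixOf_iff_prefix.mp (by simpa using hps)
        rw [pvStep p.1 p.2 (by simpa using hmem) c t hpre, hscan, hfind]
        simp only [Option.elim]
        exact congrArg _ (ih _ (by simp [List.length_drop] at hl ⊢; omega))

theorem pvDrop_len (k : List Char) (c : Char) (t : List Char) (hk : k ≠ []) :
    List.drop k.length (c :: t) = t.drop (k.length - 1) := by
  cases k with
  | nil => exact absurd rfl hk
  | cons a k' => simp

-- Bridge: PySem's fueled replace is pvRepl (for a nonempty pattern).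
theorem pvGo_spec (k v : List Char) (hk : k ≠ []) : ∀ (fuel : Nat) (l acc : List Char),
    l.length ≤ fuel →
    PySem.Chars.replace.go k v fuel l acc = acc.reverse ++ pvRepl k v l := by
  intro fuel
  induction fuel with
  | zero =>
    intro l acc h
    have : l = [] := List.length_eq_zero_iff.mp (Nat.le_zero.mp h)
    subst this
    rw [PySem.Chars.replace.go.eq_1, pvRepl_nil]
  | succ n ih =>
    intro l acc h
    cases l with
    | nil =>
      rw [PySem.Chars.replace.go.eq_2 _ _ _ _ (by omega), pvRepl_nil, List.append_nil]
    | cons c t =>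
      rw [PySem.Chars.replace.go.eq_3]
      by_cases hp : k.isPrefixOf (c :: t) = true
      · rw [if_pos hp]
        have hlen : (List.drop k.length (c :: t)).length ≤ n := by
          have hk1 : 1 ≤ k.length := by
            cases k with
            | nil => exact absurd rfl hk
            | cons a k' => simp
          simp only [List.length_drop, List.length_cons] at *
          omega
        rw [ih _ _ hlen, pvRepl_cons_pos _ _ _ _ hp, pvDrop_len k c t hk]
        simp
      · rw [if_neg hp]
        have := ih t (c :: acc) (by simp at h; omega)
        rw [this, pvRepl_cons_neg _ _ _ _ (Bool.eq_false_iff.mpr hp)]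
        simp

theorem pvChars_replace_eq (s k v : List Char) (hk : k ≠ []) :
    PySem.Chars.replace s k v = pvRepl k v s := by
  rw [PySem.Chars.replace]
  have : k.isEmpty = false := by cases k with | nil => exact absurd rfl hk | cons a t => rfl
  rw [this]
  simpa using pvGo_spec k v hk s.length s [] (le_refl _)

theorem pvFoldA_toList (tbl : List (String × String)) :
    (∀ p ∈ tbl, p.1.toList ≠ []) → ∀ s : String,
    (tbl.foldl (fun r p => PySem.Str.replace r p.1 p.2) s).toList =
      pvFoldRepl (tbl.map (fun p => (p.1.toList, p.2.toList))) s.toList := by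
  induction tbl with
  | nil => intro _ s; rfl
  | cons p tl ih =>
    intro h s
    rw [List.foldl_cons, List.map_cons, pvFoldRepl_cons,
      ih (fun q hq => h q (List.mem_cons_of_mem _ hq)) (PySem.Str.replace s p.1 p.2),
      PySem.Str.toList_replace, pvChars_replace_eq _ _ _ (h p (List.mem_cons_self))]

-- ===== VERDICT (by name: the statement is the Claim_ definition above) =====
theorem transform_to_new_standard_spec : Claim_equal_transform_to_new_standard := by
  intro date rest ext _
  unfold Spec_transform_to_new_standard transform_to_new_standard transform_to_new_standard_alt
  have h : pvTableA.foldl (fun r p => PySem.Str.replace r p.1 p.2) rest =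
      String.ofList (pvScan rest.toList) := by
    apply String.toList_inj.mp
    rw [String.toList_ofList, pvFoldA_toList pvTableA (by decide) rest,
      show pvTableA.map (fun p => (p.1.toList, p.2.toList)) = pvTableB from by decide]
    exact pvMain rest.toList.length rest.toList (le_refl _)
  rw [h]
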